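-- pv_equiv track=rewrite | github.com/AyushSehgal/informed-align-unlearn | 7_scaling_experiment.py | build_corpus_at_size
-- ===== SOURCE A (Python) =====
-- def build_corpus_at_size(target_size, base_corpus, base_sanitized, model, tokenizer, anchors, generated_pool=None):
--     """Build a corpus of (original, sanitized) pairs at the target size.
--
--     Strategy:
--     - Start with base RWKU corpus (128 passages)
--     - Add model-generated passages (up to MAX_UNIQUE_GENERATIONS)
--     - For sizes beyond unique pool, oversample with shuffling
--     """
--     corpus = list(base_corpus)
--     sanitized = list(base_sanitized)
--
--     if target_size <= len(corpus):
--         # Just subsample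
--         return corpus[:target_size], sanitized[:target_size]
--
--     # Use pre-generated pool if available
--     if generated_pool is not None:
--         pool_orig, pool_san = generated_pool
--         needed = target_size - len(corpus)
--         available = len(pool_orig)
--
--         if needed <= available:
--             corpus.extend(pool_orig[:needed])
--             sanitized.extend(pool_san[:needed])
--         else:
--             # Use all unique + oversample
--             corpus.extend(pool_orig)
--             sanitized.extend(pool_san)
--             remaining = target_size - len(corpus)
--             # Oversample from full pool (base + generated)
--             full_orig = list(base_corpus) + list(pool_orig)
--             full_san = list(base_sanitized) + list(pool_san)
--             for i in range(remaining):
--                 idx = i % len(full_orig)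
--                 corpus.append(full_orig[idx])
--                 sanitized.append(full_san[idx])
--
--     assert len(corpus) == target_size, f"Expected {target_size}, got {len(corpus)}"
--     assert len(sanitized) == target_size
--     return corpus, sanitized
-- ===== SOURCE B (Python) =====
-- def build_corpus_at_size(target_size, base_corpus, base_sanitized, model, tokenizer, anchors, generated_pool=None):
--     """Build (original, sanitized) corpus pairs at target_size: each side is
--     produced independently by tiling base+pool cyclically to the target length."""
--     def fit(xs, pool, n):
--         seq = list(xs) + list(pool)
--         if n <= len(seq):
--             return seq[:n]
--         reps = n // len(seq) + 1
--         return (seq * reps)[:n]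
--     if generated_pool is not None and len(base_corpus) < target_size:
--         pool_orig, pool_san = generated_pool
--         return (fit(base_corpus, pool_orig, target_size),
--                 fit(base_sanitized, pool_san, target_size))
--     return list(base_corpus)[:target_size], list(base_sanitized)[:target_size]
-- ===== Notes on version B (the rewrite author's own statement) =====
-- stated objective: simpler
-- what changed: B has no mutable corpus/sanitized accumulators and no per-branch pair bookkeeping: a single helper fit(xs, pool, n) builds one side by slicing base+pool to n, or, past the pool, by closed-form cyclic tiling ((seq*reps)[:n]) instead of A's element-by-element append loop with i % len indexing; the helper is applied once per side. Pre_ excludes exactly the inputs where A raises (missing pool or length mismatches that trip the asserts / IndexError / ZeroDivisionError).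
import Mathlib
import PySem

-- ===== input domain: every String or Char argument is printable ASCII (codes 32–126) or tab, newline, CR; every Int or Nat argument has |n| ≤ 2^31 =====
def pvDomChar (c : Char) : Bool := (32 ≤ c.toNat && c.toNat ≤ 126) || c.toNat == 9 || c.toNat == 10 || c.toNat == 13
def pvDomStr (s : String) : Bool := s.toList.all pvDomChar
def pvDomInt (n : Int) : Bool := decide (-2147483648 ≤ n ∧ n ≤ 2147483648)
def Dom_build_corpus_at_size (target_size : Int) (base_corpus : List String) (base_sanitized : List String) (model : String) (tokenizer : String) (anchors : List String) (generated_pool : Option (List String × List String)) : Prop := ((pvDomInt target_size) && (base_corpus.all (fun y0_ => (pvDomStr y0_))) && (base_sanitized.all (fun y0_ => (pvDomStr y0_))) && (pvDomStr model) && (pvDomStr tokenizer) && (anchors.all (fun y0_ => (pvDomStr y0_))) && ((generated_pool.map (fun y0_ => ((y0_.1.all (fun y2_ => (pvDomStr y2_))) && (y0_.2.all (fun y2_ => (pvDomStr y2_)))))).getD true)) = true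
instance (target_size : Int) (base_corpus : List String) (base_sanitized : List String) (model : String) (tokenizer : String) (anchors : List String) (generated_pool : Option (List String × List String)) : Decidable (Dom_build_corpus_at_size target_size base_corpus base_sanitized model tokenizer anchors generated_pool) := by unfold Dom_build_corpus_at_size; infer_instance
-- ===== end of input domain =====

-- B replaces A's stateful two-accumulator construction and oversampling loop by one
-- per-side helper that slices or cyclically tiles base+pool to the target length (simpler).
-- ===== PORT A =====
-- Port of A. Python A raises (AssertionError / IndexError / ZeroDivisionError) on the
-- inputs excluded by Pre_ below; on those paths the port returns the state reached, which
-- the claim never looks at.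
def build_corpus_at_size (target_size : Int) (base_corpus : List String) (base_sanitized : List String) (model : String) (tokenizer : String) (anchors : List String) (generated_pool : Option (List String × List String)) : List String × List String :=
  -- corpus = list(base_corpus); sanitized = list(base_sanitized)
  if target_size ≤ (base_corpus.length : Int) then
    (PySem.List.slice base_corpus none (some target_size),
     PySem.List.slice base_sanitized none (some target_size))
  else
    match generated_pool with
    | none => (base_corpus, base_sanitized)  -- Python reaches the failing assert here (excluded by Pre_)
    | some (pool_orig, pool_san) =>
      let needed := target_size - (base_corpus.length : Int)
      let available : Int := pool_orig.length
      if needed ≤ available then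
        (base_corpus ++ PySem.List.slice pool_orig none (some needed),
         base_sanitized ++ PySem.List.slice pool_san none (some needed))
      else
        let corpus := base_corpus ++ pool_orig
        let sanitized := base_sanitized ++ pool_san
        let remaining := target_size - (corpus.length : Int)
        let full_orig := base_corpus ++ pool_orig
        let full_san := base_sanitized ++ pool_san
        -- for i in range(remaining): idx = i % len(full_orig); append full_orig[idx], full_san[idx]
        -- (pyGetD: the IndexError / ZeroDivisionError cases are excluded by Pre_)
        (PySem.List.pyRange 0 remaining 1).foldl
          (fun st i =>
            (st.1 ++ [PySem.List.pyGetD full_orig (PySem.Int.mod i (full_orig.length : Int)) ""],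
             st.2 ++ [PySem.List.pyGetD full_san (PySem.Int.mod i (full_orig.length : Int)) ""]))
          (corpus, sanitized)

-- ===== PORT B =====
-- Port of B (Source B): fit(xs, pool, n) builds one side — slice base+pool to n, or tile it
-- cyclically in closed form ((seq * reps)[:n]) when n runs past the pool.
def pvFit (xs : List String) (pool : List String) (n : Int) : List String :=
  let seq := xs ++ pool
  if n ≤ (seq.length : Int) then
    PySem.List.slice seq none (some n)
  else
    let reps := PySem.Int.floordiv n (seq.length : Int) + 1
    PySem.List.slice (PySem.List.pyRepeat seq reps) none (some n)

def build_corpus_at_size_alt (target_size : Int) (base_corpus : List String) (base_sanitized : List String) (model : String) (tokenizer : String) (anchors : List String) (generated_pool : Option (List String × List String)) : List String × List String :=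
  match generated_pool with
  | some (pool_orig, pool_san) =>
    if (base_corpus.length : Int) < target_size then
      (pvFit base_corpus pool_orig target_size, pvFit base_sanitized pool_san target_size)
    else
      (PySem.List.slice base_corpus none (some target_size),
       PySem.List.slice base_sanitized none (some target_size))
  | none =>
      (PySem.List.slice base_corpus none (some target_size),
       PySem.List.slice base_sanitized none (some target_size))

-- ===== PRECONDITION & SPEC =====
-- Pre_ holds exactly where Python A returns normally: either a plain subsample, or a pool is
-- given and the lengths work out so that neither assert fires and no IndexError/ZeroDivisionError
-- occurs in the oversample loop. It excludes raising inputs only, no input on which A returns.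
def Pre_build_corpus_at_size (target_size : Int) (base_corpus : List String) (base_sanitized : List String) (model : String) (tokenizer : String) (anchors : List String) (generated_pool : Option (List String × List String)) : Prop :=
  target_size ≤ (base_corpus.length : Int) ∨
  (generated_pool ≠ none ∧
    ((target_size - (base_corpus.length : Int) ≤ ((generated_pool.getD ([], [])).1.length : Int) ∧
       (base_sanitized.length : Int) +
         min (target_size - (base_corpus.length : Int)) ((generated_pool.getD ([], [])).2.length : Int) = target_size) ∨
     (((generated_pool.getD ([], [])).1.length : Int) < target_size - (base_corpus.length : Int) ∧
       0 < base_corpus.length + (generated_pool.getD ([], [])).1.length ∧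
       base_sanitized.length + (generated_pool.getD ([], [])).2.length =
         base_corpus.length + (generated_pool.getD ([], [])).1.length)))

instance (target_size : Int) (base_corpus : List String) (base_sanitized : List String) (model : String) (tokenizer : String) (anchors : List String) (generated_pool : Option (List String × List String)) : Decidable (Pre_build_corpus_at_size target_size base_corpus base_sanitized model tokenizer anchors generated_pool) := by unfold Pre_build_corpus_at_size; infer_instance

def pvWitness_build_corpus_at_size : Int × List String × List String × String × String × List String × (Option (List String × List String)) :=
  (3, ["a"], ["x"], "m", "t", [], some (["b"], ["y"]))

def Spec_build_corpus_at_size (target_size : Int) (base_corpus : List String) (base_sanitized : List String) (model : String) (tokenizer : String) (anchors : List String) (generated_pool : Option (List String × List String)) (out : List String × List String) : Prop := out = build_corpus_at_size_alt target_size base_corpus base_sanitized model tokenizer anchors generated_pool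
instance (target_size : Int) (base_corpus : List String) (base_sanitized : List String) (model : String) (tokenizer : String) (anchors : List String) (generated_pool : Option (List String × List String)) (out : List String × List String) : Decidable (Spec_build_corpus_at_size target_size base_corpus base_sanitized model tokenizer anchors generated_pool out) := by unfold Spec_build_corpus_at_size; infer_instance

-- ===== CLAIM (what is proved, stated in full; the proofs are below) =====
def Claim_equal_build_corpus_at_size : Prop := ∀ (target_size : Int) (base_corpus : List String) (base_sanitized : List String) (model : String) (tokenizer : String) (anchors : List String) (generated_pool : Option (List String × List String)), Dom_build_corpus_at_size target_size base_corpus base_sanitized model tokenizer anchors generated_pool → Pre_build_corpus_at_size target_size base_corpus base_sanitized model tokenizer anchors generated_pool → Spec_build_corpus_at_size target_size base_corpus base_sanitized model tokenizer anchors generated_pool (build_corpus_at_size target_size base_corpus base_sanitized model tokenizer anchors generated_pool)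

-- ===== LEMMAS AND PROOFS =====

-- elements of a k-fold repetition of `full`, by index
theorem flatten_replicate_getElem? {α : Type} (full : List α) (k : Nat) :
    ∀ i : Nat, i < k * full.length →
      ((List.replicate k full).flatten)[i]? = full[i % full.length]? := by
  induction k with
  | zero => intro i hi; omega
  | succ k ih =>
    intro i hi
    rw [List.replicate_succ, List.flatten_cons]
    by_cases h : i < full.length
    · rw [List.getElem?_append_left h, Nat.mod_eq_of_lt h]
    · have hle : full.length ≤ i := by omega
      have h3 : (k + 1) * full.length = k * full.length + full.length := by
        rw [Nat.add_mul, Nat.one_mul]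
      rw [List.getElem?_append_right hle, ih (i - full.length) (by omega),
        Nat.mod_eq_sub_mod hle]

-- taking n elements of the tiled pool is the same list as indexing full[k % len] for k < n
theorem tile_eq {α : Type} [Inhabited α] (full : List α) (hL : full ≠ []) (n : Nat) (d : α) :
    (List.range n).map (fun k => full.getD (k % full.length) d) =
      List.take n (List.replicate (n / full.length + 1) full).flatten := by
  have hL0 : 0 < full.length := List.length_pos_of_ne_nil hL
  have hn : n < (n / full.length + 1) * full.length := by
    have h1 := Nat.div_add_mod n full.length
    have h4 : full.length * (n / full.length) = n / full.length * full.length :=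
      Nat.mul_comm _ _
    have h2 : n % full.length < full.length := Nat.mod_lt _ hL0
    have h3 : (n / full.length + 1) * full.length = n / full.length * full.length + full.length := by
      rw [Nat.add_mul, Nat.one_mul]
    omega
  have hlen : ((List.replicate (n / full.length + 1) full).flatten).length =
      (n / full.length + 1) * full.length := by
    simp [List.length_flatten, Nat.mul_comm]
  apply List.ext_getElem?
  intro i
  by_cases hi : i < n
  · have him : i % full.length < full.length := Nat.mod_lt _ hL0
    have hib : i < (n / full.length + 1) * full.length := by omega
    rw [List.getElem?_take_of_lt hi,
      flatten_replicate_getElem? full (n / full.length + 1) i hib]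
    simp [List.getElem?_range hi, List.getD_eq_getElem?_getD, List.getElem?_eq_getElem him]
  · rw [List.getElem?_eq_none (by simpa using (by omega : n ≤ i)),
      List.getElem?_eq_none (by
        rw [List.length_take, hlen]; omega)]

-- cyclic indexing over range (L + r) splits into the list itself plus the wrapped tail
theorem map_mod_range_add {α : Type} [Inhabited α] (full : List α) (d : α) (r : Nat) :
    (List.range (full.length + r)).map (fun k => full.getD (k % full.length) d) =
      full ++ (List.range r).map (fun k => full.getD (k % full.length) d) := by
  rw [List.range_add, List.map_append, List.map_map]
  congr 1
  · apply List.ext_getElem?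
    intro i
    by_cases hi : i < full.length
    · rw [List.getElem?_map, List.getElem?_range hi, List.getElem?_eq_getElem hi]
      simp [Nat.mod_eq_of_lt hi, List.getD_eq_getElem?_getD, List.getElem?_eq_getElem hi]
    · rw [List.getElem?_eq_none (by simpa using (by omega : full.length ≤ i)),
        List.getElem?_eq_none (by simpa using (by omega : full.length ≤ i))]
  · apply List.map_congr_left
    intro k _
    simp [Function.comp, Nat.add_mod_left]

-- one side of the oversample branch: A's "full pool then wrap-around indexing" equals
-- B's closed-form tiling sliced to the target length
theorem side_eq (full : List String) (t : Int) (hno : full ≠ []) (ht : (full.length : Int) < t) :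
    full ++ (PySem.List.pyRange 0 (t - (full.length : Int)) 1).map
        (fun i => PySem.List.pyGetD full (PySem.Int.mod i (full.length : Int)) "") =
      PySem.List.slice (PySem.List.pyRepeat full (PySem.Int.floordiv t (full.length : Int) + 1))
        none (some t) := by
  have h0 : 0 < full.length := List.length_pos_of_ne_nil hno
  have h0t : 0 ≤ t := by omega
  have step1 : (PySem.List.pyRange 0 (t - (full.length : Int)) 1).map
      (fun i => PySem.List.pyGetD full (PySem.Int.mod i (full.length : Int)) "") =
      (List.range (t - (full.length : Int)).toNat).map
        (fun k => full.getD (k % full.length) "") := by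
    rw [PySem.List.pyRange_one, List.map_map]
    simp only [Int.sub_zero]
    apply List.map_congr_left
    intro k _
    simp only [Function.comp, zero_add, PySem.Int.mod_natCast, PySem.List.pyGetD_natCast]
  have hsplit : t.toNat = full.length + (t - (full.length : Int)).toNat := by omega
  rw [step1, show full ++ (List.range (t - (full.length : Int)).toNat).map
        (fun k => full.getD (k % full.length) "") =
      (List.range t.toNat).map (fun k => full.getD (k % full.length) "") by
    rw [hsplit, map_mod_range_add],
    tile_eq full hno t.toNat "", PySem.List.slice_to _ h0t]
  have hreps : (PySem.Int.floordiv t (full.length : Int) + 1).toNat = t.toNat / full.length + 1 := by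
    have h := PySem.Int.floordiv_natCast t.toNat full.length
    rw [show ((t.toNat : Nat) : Int) = t from Int.toNat_of_nonneg h0t] at h
    rw [h, ← Nat.cast_add_one, Int.toNat_natCast]
  simp [PySem.List.pyRepeat, hreps]

-- ===== VERDICT (by name: the statement is the Claim_ definition above) =====
theorem build_corpus_at_size_spec : Claim_equal_build_corpus_at_size := by
  intro target_size base_corpus base_sanitized model tokenizer anchors generated_pool hdom hpre
  unfold Spec_build_corpus_at_size build_corpus_at_size build_corpus_at_size_alt
  by_cases hsub : target_size ≤ (base_corpus.length : Int)
  · -- subsample: both sides return the two slices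
    simp only [if_pos hsub]
    rcases generated_pool with _ | ⟨pool_orig, pool_san⟩
    · rfl
    · simp only [if_neg (by omega : ¬ (base_corpus.length : Int) < target_size)]
  · simp only [if_neg hsub]
    rcases generated_pool with _ | ⟨pool_orig, pool_san⟩
    · exact absurd hpre (by simp [Pre_build_corpus_at_size, hsub])
    · simp only [if_pos (by omega : (base_corpus.length : Int) < target_size)]
      have h0t : 0 ≤ target_size := by omega
      by_cases hav : target_size - (base_corpus.length : Int) ≤ (pool_orig.length : Int)
      · -- needed ≤ available: both sides are prefixes of base ++ pool
        simp only [if_pos hav]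
        -- sanitized-length fact from the assert (Pre_)
        have hsan : (base_sanitized.length : Int) +
            min (target_size - (base_corpus.length : Int)) (pool_san.length : Int) = target_size := by
          rcases hpre with h | ⟨-, h⟩
          · exact absurd h hsub
          rcases h with ⟨-, h2⟩ | ⟨h1, -⟩
          · simpa using h2
          · exact absurd (by simpa using h1) (by omega)
        unfold pvFit
        simp only [if_pos (by simp only [List.length_append]; push_cast; omega :
            target_size ≤ ((base_corpus ++ pool_orig).length : Int)),
          if_pos (by simp only [List.length_append]; push_cast; omega :
            target_size ≤ ((base_sanitized ++ pool_san).length : Int))]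
        refine Prod.ext ?_ ?_
        · show base_corpus ++ PySem.List.slice pool_orig none (some (target_size - (base_corpus.length : Int))) =
              PySem.List.slice (base_corpus ++ pool_orig) none (some target_size)
          rw [PySem.List.slice_to _ (by omega), PySem.List.slice_to _ h0t, List.take_append,
            List.take_of_length_le (l := base_corpus) (by omega)]
          congr 2
          omega
        · show base_sanitized ++ PySem.List.slice pool_san none (some (target_size - (base_corpus.length : Int))) =
              PySem.List.slice (base_sanitized ++ pool_san) none (some target_size)
          rw [PySem.List.slice_to _ (by omega), PySem.List.slice_to _ h0t, List.take_append,
            List.take_of_length_le (l := base_sanitized) (by omega)]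
          congr 1
          rw [List.take_eq_take_iff]
          omega
      · -- oversample: A's loop vs B's closed-form tiling
        simp only [if_neg hav]
        rcases hpre with h | ⟨-, h⟩
        · exact absurd h hsub
        rcases h with ⟨h1, -⟩ | ⟨-, hne, hlen⟩
        · exact absurd (by simpa using h1) hav
        simp only [Option.getD_some] at hne hlen
        rw [PySem.List.foldl_prod_mk
          (f := fun acc i => acc ++ [PySem.List.pyGetD (base_corpus ++ pool_orig)
            (PySem.Int.mod i ((base_corpus ++ pool_orig).length : Int)) ""])
          (g := fun acc i => acc ++ [PySem.List.pyGetD (base_sanitized ++ pool_san)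
            (PySem.Int.mod i ((base_corpus ++ pool_orig).length : Int)) ""]),
          PySem.List.foldl_append_singleton_eq_map, PySem.List.foldl_append_singleton_eq_map]
        have hLo : (base_corpus ++ pool_orig).length = base_corpus.length + pool_orig.length :=
          List.length_append
        have hLs : (base_sanitized ++ pool_san).length = base_sanitized.length + pool_san.length :=
          List.length_append
        have hsaneq : (base_sanitized ++ pool_san).length = (base_corpus ++ pool_orig).length := by
          omega
        have hno : (base_corpus ++ pool_orig) ≠ [] := by
          intro hc; rw [hc] at hLo; simp at hLo; omega
        have hns : (base_sanitized ++ pool_san) ≠ [] := by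
          intro hc; rw [hc] at hLs; simp at hLs; omega
        have hgt : ¬ target_size ≤ ((base_corpus ++ pool_orig).length : Int) := by
          rw [hLo]; push_cast; omega
        have hgts : ¬ target_size ≤ ((base_sanitized ++ pool_san).length : Int) := by
          rw [hLs]; push_cast; omega
        unfold pvFit
        simp only [if_neg hgt, if_neg hgts]
        refine Prod.ext ?_ ?_
        · exact side_eq (base_corpus ++ pool_orig) target_size hno (by omega)
        · show base_sanitized ++ pool_san ++ _ = _
          rw [← hsaneq]
          exact side_eq (base_sanitized ++ pool_san) target_size hns (by rw [hsaneq]; omega)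
theorem build_corpus_at_size_witness_ok : Dom_build_corpus_at_size (pvWitness_build_corpus_at_size.1) (pvWitness_build_corpus_at_size.2.1) (pvWitness_build_corpus_at_size.2.2.1) (pvWitness_build_corpus_at_size.2.2.2.1) (pvWitness_build_corpus_at_size.2.2.2.2.1) (pvWitness_build_corpus_at_size.2.2.2.2.2.1) (pvWitness_build_corpus_at_size.2.2.2.2.2.2) ∧ Pre_build_corpus_at_size (pvWitness_build_corpus_at_size.1) (pvWitness_build_corpus_at_size.2.1) (pvWitness_build_corpus_at_size.2.2.1) (pvWitness_build_corpus_at_size.2.2.2.1) (pvWitness_build_corpus_at_size.2.2.2.2.1) (pvWitness_build_corpus_at_size.2.2.2.2.2.1) (pvWitness_build_corpus_at_size.2.2.2.2.2.2) := by decide
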